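-- pv_equiv track=rewrite | github.com/Azure/azure-iot-ops-cli-extension | azext_edge/edge/providers/check/base/resource.py | combine_statuses
-- ===== SOURCE A (Python) =====
-- from typing import Any, Dict, List, Optional, Tuple, Union
--
-- def combine_statuses(status_list: List[str]):
--     # lower case status list
--     status_list = [status.lower() for status in status_list]
--     final_status = "success"
--     for status in status_list:
--         if final_status == "success" and status not in ["running", "succeeded", "ok"]:
--             final_status = status
--         elif final_status in ["warning", "skipped", "warn", "starting", "recovering"] and status == "error":
--             final_status = status
--     return final_status
-- ===== SOURCE B (Python) =====
-- def combine_statuses(status_list):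
--     lowered = [status.lower() for status in status_list]
--     # first status that cannot leave the final status at "success"
--     i = next((i for i, s in enumerate(lowered)
--               if s not in ("running", "succeeded", "ok", "success")), None)
--     if i is None:
--         return "success"
--     pivot = lowered[i]
--     if pivot in ("warning", "skipped", "warn", "starting", "recovering") and "error" in lowered[i + 1:]:
--         return "error"
--     return pivot
-- ===== Notes on version B (the rewrite author's own statement) =====
-- stated objective: alternative
-- what changed: Replaces the single stateful accumulator loop by an explicit find-the-pivot step (first status outside the ok-set, 'success' included since it leaves the accumulator unchanged) followed by a membership test for 'error' in the remainder of the list.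
import Mathlib
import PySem

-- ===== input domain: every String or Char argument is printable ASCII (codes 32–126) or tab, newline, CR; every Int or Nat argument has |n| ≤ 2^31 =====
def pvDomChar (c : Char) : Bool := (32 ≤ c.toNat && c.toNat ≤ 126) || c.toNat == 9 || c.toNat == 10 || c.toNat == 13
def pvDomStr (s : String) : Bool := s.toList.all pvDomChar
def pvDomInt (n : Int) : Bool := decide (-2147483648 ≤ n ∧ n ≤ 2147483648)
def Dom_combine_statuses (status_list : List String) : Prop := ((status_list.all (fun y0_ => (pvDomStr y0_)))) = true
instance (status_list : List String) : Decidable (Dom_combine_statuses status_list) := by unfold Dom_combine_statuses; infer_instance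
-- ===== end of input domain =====

-- B replaces A's stateful accumulator loop by an explicit find-pivot-then-scan-remainder
-- decomposition (alternative structure, same cost).

-- ===== PORT A =====
-- A's loop body, one step of the accumulator update
def aStep (final_status status : String) : String :=
  if final_status = "success" ∧ status ∉ (["running", "succeeded", "ok"] : List String) then status
  else if final_status ∈ (["warning", "skipped", "warn", "starting", "recovering"] : List String) ∧ status = "error" then status
  else final_status

def combine_statuses (status_list : List String) : String :=
  let status_list := status_list.map PySem.Str.lower
  status_list.foldl aStep "success"

-- ===== PORT B =====
-- statuses that leave the accumulator at "success"
def bOk : List String := ["running", "succeeded", "ok", "success"]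
def bWarn : List String := ["warning", "skipped", "warn", "starting", "recovering"]

-- next((i for i, s in enumerate(lowered) if s not in ...), None) + lowered[i], lowered[i+1:]
def bFindPivot : List String → Option (String × List String)
  | [] => none
  | s :: rest => if s ∈ bOk then bFindPivot rest else some (s, rest)

def combine_statuses_alt (status_list : List String) : String :=
  let lowered := status_list.map PySem.Str.lower
  match bFindPivot lowered with
  | none => "success"
  | some (pivot, rest) =>
      if pivot ∈ bWarn ∧ "error" ∈ rest then "error" else pivot

-- ===== PRECONDITION & SPEC =====
def Spec_combine_statuses (status_list : List String) (out : String) : Prop := out = combine_statuses_alt status_list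
instance (status_list : List String) (out : String) : Decidable (Spec_combine_statuses status_list out) := by unfold Spec_combine_statuses; infer_instance

-- ===== CLAIM (what is proved, stated in full; the proofs are below) =====
def Claim_equal_combine_statuses : Prop := ∀ (status_list : List String), Dom_combine_statuses status_list → Spec_combine_statuses status_list (combine_statuses status_list)

-- ===== LEMMAS AND PROOFS =====

-- once the accumulator is neither "success" nor a warning-class status, it never changes
lemma foldl_stuck (p : String) (hp : p ≠ "success") (hw : p ∉ bWarn) :
    ∀ l : List String, l.foldl aStep p = p
  | [] => rfl
  | s :: rest => by
    have hstep : aStep p s = p := by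
      unfold aStep
      rw [if_neg (fun h => hp h.1), if_neg (fun h => hw h.1)]
    rw [List.foldl_cons, hstep]
    exact foldl_stuck p hp hw rest

-- from a warning-class accumulator, the loop returns "error" iff "error" occurs later
lemma foldl_warn (p : String) (hw : p ∈ bWarn) :
    ∀ l : List String, l.foldl aStep p = if "error" ∈ l then "error" else p
  | [] => by simp
  | s :: rest => by
    have hp : p ≠ "success" := by
      simp only [bWarn, List.mem_cons, List.not_mem_nil, or_false] at hw
      rcases hw with rfl | rfl | rfl | rfl | rfl <;> decide
    by_cases hs : s = "error"
    · subst hs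
      have hstep : aStep p "error" = "error" := by
        unfold aStep
        rw [if_neg (fun h => hp h.1), if_pos ⟨hw, rfl⟩]
      rw [List.foldl_cons, hstep,
        foldl_stuck "error" (by decide) (by decide) rest]
      simp
    · have hstep : aStep p s = p := by
        unfold aStep
        rw [if_neg (fun h => hp h.1), if_neg (fun h => hs h.2)]
      rw [List.foldl_cons, hstep, foldl_warn p hw rest]
      simp [Ne.symm hs]

-- the accumulator loop from "success" computes B's pivot/remainder decomposition
lemma foldl_eq_pivot : ∀ l : List String,
    l.foldl aStep "success" =
      (match bFindPivot l with
       | none => "success"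
       | some (pivot, rest) => if pivot ∈ bWarn ∧ "error" ∈ rest then "error" else pivot)
  | [] => rfl
  | s :: rest => by
    by_cases hs : s ∈ bOk
    · have hstep : aStep "success" s = "success" := by
        unfold aStep
        by_cases hA : s ∈ (["running", "succeeded", "ok"] : List String)
        · rw [if_neg (fun h => h.2 hA), if_neg (fun h => absurd h.1 (by decide))]
        · have hsucc : s = "success" := by
            simp only [bOk, List.mem_cons, List.not_mem_nil, or_false] at hs
            simp only [List.mem_cons, List.not_mem_nil, or_false] at hA
            tauto
          rw [if_pos ⟨rfl, hA⟩, hsucc]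
      rw [List.foldl_cons, hstep, foldl_eq_pivot rest]
      simp [bFindPivot, hs]
    · have hA : s ∉ (["running", "succeeded", "ok"] : List String) := by
        simp only [bOk, List.mem_cons, List.not_mem_nil, or_false] at hs ⊢
        tauto
      have hsucc : s ≠ "success" := by
        simp only [bOk, List.mem_cons, List.not_mem_nil, or_false] at hs
        tauto
      have hstep : aStep "success" s = s := by
        unfold aStep; rw [if_pos ⟨rfl, hA⟩]
      rw [List.foldl_cons, hstep]
      simp only [bFindPivot, if_neg hs]
      by_cases hw : s ∈ bWarn
      · rw [foldl_warn s hw rest]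
        by_cases he : "error" ∈ rest <;> simp [he, hw]
      · rw [foldl_stuck s hsucc hw rest]
        simp [hw]

-- ===== VERDICT (by name: the statement is the Claim_ definition above) =====
theorem combine_statuses_spec : Claim_equal_combine_statuses := by
  intro status_list _
  unfold Spec_combine_statuses combine_statuses combine_statuses_alt
  exact foldl_eq_pivot _
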